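-- pv_equiv track=rewrite | github.com/shaunthebuilder/Open-GR-WM | app.py | extend_json_remove_end
-- ===== SOURCE A (Python) =====
-- def extend_json_remove_end(text: str, end_idx: int) -> int:
--     i = min(max(end_idx, 0), len(text))
--     while i < len(text) and text[i] in " \t\r\n":
--         i += 1
--     if text.startswith("```", i):
--         i += 3
--         while i < len(text) and text[i] not in "\r\n":
--             i += 1
--         while i < len(text) and text[i] in "\r\n":
--             i += 1
--     return i
-- ===== SOURCE B (Python) =====
-- def extend_json_remove_end(text: str, end_idx: int) -> int:
--     n = len(text)
--     i = min(max(end_idx, 0), n)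
--     tail = text[i:].lstrip(" \t\r\n")
--     if tail.startswith("```"):
--         body = tail[3:]
--         nl = next((k for k, c in enumerate(body) if c in "\r\n"), len(body))
--         tail = body[nl:].lstrip("\r\n")
--     return n - len(tail)
-- ===== Notes on version B (the rewrite author's own statement) =====
-- stated objective: idiomatic
-- what changed: Replaces A's three manual index-advancing while loops with suffix-string operations (lstrip, first-newline index via enumerate/next, lstrip), returning len(text) minus the remaining suffix length.
import Mathlib
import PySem

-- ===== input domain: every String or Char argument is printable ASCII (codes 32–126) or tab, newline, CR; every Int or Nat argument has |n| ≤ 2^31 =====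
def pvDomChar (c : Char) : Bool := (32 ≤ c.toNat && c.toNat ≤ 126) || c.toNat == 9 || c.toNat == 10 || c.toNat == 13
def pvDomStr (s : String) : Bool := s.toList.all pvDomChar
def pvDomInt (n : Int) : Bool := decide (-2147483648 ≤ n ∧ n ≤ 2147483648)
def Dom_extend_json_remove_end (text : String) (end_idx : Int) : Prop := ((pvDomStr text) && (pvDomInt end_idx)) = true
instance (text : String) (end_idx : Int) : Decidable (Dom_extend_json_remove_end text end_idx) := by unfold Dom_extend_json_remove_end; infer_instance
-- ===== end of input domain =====

-- B replaces A's three index-advancing while loops by suffix-string operations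
-- (lstrip / first-newline index / lstrip), returning len(text) - len(remaining suffix);
-- objective: idiomatic, same cost.

-- ===== PORT A =====
-- generic transliteration of one Python 'while i < len(text) and p(text[i]): i += 1' loop
def pvWhileIdx (cs : List Char) (p : Char → Bool) (i : Nat) : Nat :=
  if h : i < cs.length then
    (if p cs[i] then pvWhileIdx cs p (i + 1) else i)
  else i
termination_by cs.length - i

def extend_json_remove_end (text : String) (end_idx : Int) : Int :=
  let cs := text.toList
  let i0 : Nat := (min (max end_idx 0) (cs.length : Int)).toNat
  let i1 := pvWhileIdx cs (fun c => c = ' ' || c = '\t' || c = '\r' || c = '\n') i0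
  if ['`', '`', '`'].isPrefixOf (cs.drop i1) then  -- text.startswith("```", i)
    let i2 := pvWhileIdx cs (fun c => !(c = '\r' || c = '\n')) (i1 + 3)
    let i3 := pvWhileIdx cs (fun c => c = '\r' || c = '\n') i2
    (i3 : Int)
  else (i1 : Int)

-- ===== PORT B =====
def extend_json_remove_end_alt (text : String) (end_idx : Int) : Int :=
  let cs := text.toList
  let n := cs.length
  let i : Nat := (min (max end_idx 0) (n : Int)).toNat
  -- text[i:].lstrip(" \t\r\n")
  let tail := (cs.drop i).dropWhile (fun c => c = ' ' || c = '\t' || c = '\r' || c = '\n')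
  if ['`', '`', '`'].isPrefixOf tail then
    let body := tail.drop 3
    -- nl = next((k for k, c in enumerate(body) if c in "\r\n"), len(body))
    let nl := (body.findIdx? (fun c => c = '\r' || c = '\n')).getD body.length
    -- body[nl:].lstrip("\r\n")
    let tail2 := (body.drop nl).dropWhile (fun c => c = '\r' || c = '\n')
    ((n : Int) - tail2.length)
  else ((n : Int) - tail.length)

-- ===== PRECONDITION & SPEC =====
def Spec_extend_json_remove_end (text : String) (end_idx : Int) (out : Int) : Prop := out = extend_json_remove_end_alt text end_idx
instance (text : String) (end_idx : Int) (out : Int) : Decidable (Spec_extend_json_remove_end text end_idx out) := by unfold Spec_extend_json_remove_end; infer_instance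

-- ===== CLAIM (what is proved, stated in full; the proofs are below) =====
def Claim_equal_extend_json_remove_end : Prop := ∀ (text : String) (end_idx : Int), Dom_extend_json_remove_end text end_idx → Spec_extend_json_remove_end text end_idx (extend_json_remove_end text end_idx)

-- ===== LEMMAS AND PROOFS =====

-- A's index loop lands where the corresponding dropWhile suffix begins.
theorem pvWhileIdx_eq (cs : List Char) (p : Char → Bool) :
    ∀ (k i : Nat), cs.length - i ≤ k → i ≤ cs.length →
      pvWhileIdx cs p i = cs.length - ((cs.drop i).dropWhile p).length := by
  intro k
  induction k with
  | zero =>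
    intro i hk hi
    have hii : i = cs.length := by omega
    rw [pvWhileIdx, dif_neg (by omega)]
    simp [hii]
  | succ k ih =>
    intro i hk hi
    by_cases h : i < cs.length
    · rw [pvWhileIdx, dif_pos h, List.drop_eq_getElem_cons h]
      by_cases hp : p cs[i]
      · rw [if_pos hp, List.dropWhile_cons_of_pos hp]
        exact ih (i + 1) (by omega) (by omega)
      · rw [if_neg hp, List.dropWhile_cons_of_neg hp]
        have := List.length_drop (l := cs) (i := i + 1)
        simp only [List.length_cons, this]
        omega
    · have hii : i = cs.length := by omega
      rw [pvWhileIdx, dif_neg (by omega)]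
      simp [hii]

-- a list equal to a suffix of cs is recovered by dropping (length - its length)
theorem drop_sub_length_of_suffix (cs t : List Char) (h : t <:+ cs) :
    cs.drop (cs.length - t.length) = t := by
  obtain ⟨s, hs⟩ := h
  subst hs
  have : s.length + t.length - t.length = s.length := by omega
  simp [this]

-- the first-newline index via findIdx? agrees with dropWhile of the negated predicate
theorem drop_findIdx?_getD (l : List Char) (p : Char → Bool) :
    l.drop ((l.findIdx? p).getD l.length) = l.dropWhile (fun c => !(p c)) := by
  induction l with
  | nil => simp
  | cons x xs ih =>
    by_cases hp : p x
    · simp [List.findIdx?_cons, hp]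
    · simp only [List.findIdx?_cons, hp, List.dropWhile_cons, Bool.not_false]
      cases hfi : xs.findIdx? p with
      | none =>
        simpa [hfi] using ih
      | some j =>
        have hj := ih
        rw [hfi] at hj
        simpa [hfi, List.drop_succ_cons] using hj

-- ===== VERDICT (by name: the statement is the Claim_ definition above) =====
theorem extend_json_remove_end_spec : Claim_equal_extend_json_remove_end := by
  intro text end_idx _
  unfold Spec_extend_json_remove_end extend_json_remove_end extend_json_remove_end_alt
  dsimp only
  set cs := text.toList with hcs
  set i0 : Nat := (min (max end_idx 0) (cs.length : Int)).toNat with hi0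
  have hi0le : i0 ≤ cs.length := by
    rw [hi0]; omega
  set wsP : Char → Bool := fun c => c = ' ' || c = '\t' || c = '\r' || c = '\n' with hws
  set nlP : Char → Bool := fun c => c = '\r' || c = '\n' with hnl
  set tail := (cs.drop i0).dropWhile wsP with htail
  have htsuf : tail <:+ cs := (List.dropWhile_suffix _).trans (List.drop_suffix _ _)
  have htlen : tail.length ≤ cs.length := htsuf.length_le
  have h1 : pvWhileIdx cs wsP i0 = cs.length - tail.length := by
    rw [pvWhileIdx_eq cs wsP (cs.length - i0) i0 (le_refl _) hi0le]
  have hdrop1 : cs.drop (cs.length - tail.length) = tail :=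
    drop_sub_length_of_suffix cs tail htsuf
  rw [h1, hdrop1]
  by_cases hfence : ['`', '`', '`'].isPrefixOf tail
  · rw [if_pos hfence, if_pos hfence]
    have h3 : 3 ≤ tail.length := by
      have := (List.isPrefixOf_iff_prefix.mp hfence).length_le
      simpa using this
    set body := tail.drop 3 with hbody
    have hbodysuf : body <:+ cs := (List.drop_suffix _ _).trans htsuf
    have hdropb : cs.drop (cs.length - tail.length + 3) = body := by
      rw [hbody, ← hdrop1, List.drop_drop]
      rw [hdrop1]
    set d1 := body.dropWhile (fun c => !(nlP c)) with hd1
    have hd1suf : d1 <:+ cs := (List.dropWhile_suffix _).trans hbodysuf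
    have h2 : pvWhileIdx cs (fun c => !(nlP c)) (cs.length - tail.length + 3) =
        cs.length - d1.length := by
      rw [pvWhileIdx_eq cs _ cs.length _ (by omega) (by omega), hdropb]
    have hnlidx : body.drop ((body.findIdx? nlP).getD body.length) = d1 :=
      drop_findIdx?_getD body nlP
    have hdropd1 : cs.drop (cs.length - d1.length) = d1 :=
      drop_sub_length_of_suffix cs d1 hd1suf
    have h4 : pvWhileIdx cs nlP (cs.length - d1.length) =
        cs.length - (d1.dropWhile nlP).length := by
      rw [pvWhileIdx_eq cs nlP cs.length _ (by omega) (by omega), hdropd1]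
    rw [h2, h4, hnlidx]
    have : (d1.dropWhile nlP).length ≤ cs.length :=
      ((List.dropWhile_suffix _).trans hd1suf).length_le
    push_cast [Nat.cast_sub this]
    ring
  · rw [if_neg hfence, if_neg hfence]
    push_cast [Nat.cast_sub htlen]
    ring
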